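-- pv_equiv track=rewrite | github.com/BarryZ807/DSC20 | homeworks/hw02_new/hw02_new.py | even_old_ops
-- ===== SOURCE A (Python) =====
-- def even_old_ops(string):
--     """
--     A fucntion that reverse all elements at the even indices and change the
--     uppercase to lower, change lowercase to upper for all elements at odd
--     indices. If the elements at odd indices are not letter, change it to '.'
--
--     >>> even_old_ops("Rand0mStr1NG")
--     'NArDSM0Tn.Rg'
--     >>> even_old_ops("d_s_c__20")
--     '0._.c.s.d'
--     >>> even_old_ops("0U1U2l3l4?5?6")
--     '6u5u4L3L2.1.0'
--
--     >>> even_old_ops("hse9uvth4w598h")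
--     '8S5.4VtHuWe.hH'
--     >>> even_old_ops("54689tbfbeBUIHMesrg")
--     'g.s.MTIFBEbubh9E6R5'
--     >>> even_old_ops("")
--     ''
--     """
--     # enpty variables for storing
--     even_str = []
--     odd_str = []
--     even_num = 2
--     result = ''
--     # using loop the seperate the condition as even one and odd one
--     for i,x in enumerate(string):
--         # when even indices, append into even_str to prepare for reversing
--         if i % even_num == 0:
--             even_str.append(x)
--         #when odd idices, append into odd_str to prepare for reversing
--         if i % even_num != 0:
--             odd_str.append(x)
--     # reverse all elements in even_str
--     even_str = even_str[::-1]
--     # seperate odd indices to different conditions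
--     for m in range(len(odd_str)):
--             # If the letter is a lowercase, convert it to uppercase
--             if odd_str[m] >= 'a' and odd_str[m] <= 'z':
--                 odd_str[m] = odd_str[m].upper()
--             # # If the letter is a uppercase, convert it to lowercase
--             elif odd_str[m] >= 'A' and odd_str[m] <= 'Z':
--                 odd_str[m] = odd_str[m].lower()
--             # Last condition for otherwise
--             else:
--                 odd_str[m] = str('.')
--     # steps for join two lit together to fit the requirement
--     result = [None] * (len(odd_str)+len(even_str))
--     result[::even_num] = even_str
--     result[1::even_num] = odd_str
--     return ''.join(result)
-- ===== SOURCE B (Python) =====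
-- def even_old_ops(string):
--     evens = string[::2]
--     out = []
--     for i in range(len(string)):
--         if i % 2 == 0:
--             out.append(evens[-(i // 2 + 1)])
--         else:
--             c = string[i]
--             if 'a' <= c <= 'z':
--                 out.append(c.upper())
--             elif 'A' <= c <= 'Z':
--                 out.append(c.lower())
--             else:
--                 out.append('.')
--     return ''.join(out)
-- ===== Notes on version B (the rewrite author's own statement) =====
-- stated objective: simpler
-- what changed: B replaces A's two accumulator lists, standalone reversal, in-place transform loop and double slice-assignment interleave by a single indexed pass that fetches each even-position character from string[::2] via a negative (reversed) index and transforms odd-position characters inline.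
import Mathlib
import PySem

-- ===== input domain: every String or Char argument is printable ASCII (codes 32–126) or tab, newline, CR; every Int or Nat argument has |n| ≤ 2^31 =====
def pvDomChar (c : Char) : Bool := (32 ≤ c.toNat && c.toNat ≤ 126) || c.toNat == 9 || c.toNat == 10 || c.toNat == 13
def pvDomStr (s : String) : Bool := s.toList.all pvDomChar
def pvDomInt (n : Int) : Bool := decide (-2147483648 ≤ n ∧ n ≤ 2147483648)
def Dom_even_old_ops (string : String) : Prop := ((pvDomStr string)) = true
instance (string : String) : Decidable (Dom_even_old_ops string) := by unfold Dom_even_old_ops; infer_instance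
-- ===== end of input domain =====

-- B replaces A's two accumulator lists, standalone reversal and slice-assignment interleave by one
-- indexed pass that picks the reversed even character by negative-index arithmetic (objective: simpler).

-- ===== PORT A =====
-- loop body: two successive ifs on i % 2, appending to even_str / odd_str
def pvLoopA (st : List Char × List Char) (p : Int × Char) : List Char × List Char :=
  let st1 := if PySem.Int.mod p.1 2 = 0 then (st.1 ++ [p.2], st.2) else st
  if ¬ (PySem.Int.mod p.1 2 = 0) then (st1.1, st1.2 ++ [p.2]) else st1

-- the odd-index transformation A applies in its range-loop (lower→upper, upper→lower, else '.')
def pvSwapDotA (c : Char) : Char :=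
  if 'a' ≤ c ∧ c ≤ 'z' then PySem.Chars.upperChar c
  else if 'A' ≤ c ∧ c ≤ 'Z' then PySem.Chars.lowerChar c
  else '.'

-- result[::2] = ev; result[1::2] = od; ''.join(result) — exact because A always has
-- len(od) ≤ len(ev) ≤ len(od) + 1, so the slice assignments fill exactly alternating slots
def pvInterleave : List Char → List Char → List Char
  | [], ys => ys
  | x :: xs, ys => x :: pvInterleave ys xs
termination_by xs ys => xs.length + ys.length
decreasing_by simp; omega

def even_old_ops (string : String) : String :=
  let st := (PySem.List.enumerate string.toList 0).foldl pvLoopA ([], [])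
  let even_str := st.1.reverse
  let odd_str := st.2.map pvSwapDotA
  String.ofList (pvInterleave even_str odd_str)

-- ===== PORT B =====
def even_old_ops_alt (string : String) : String :=
  let l := string.toList
  -- string[::2]; step 2 ≠ 0, so slice? is never none and the default [] is dead
  let evens := (PySem.List.slice? l none none 2).getD []
  let out := (PySem.List.pyRange 0 (PySem.Str.len string) 1).foldl
    (fun acc i =>
      if PySem.Int.mod i 2 = 0 then
        -- evens[-(i//2+1)]; always in range for 0 ≤ i < len, so the default ' ' is dead
        acc ++ [(PySem.List.pyGet? evens (-(PySem.Int.floordiv i 2 + 1))).getD ' ']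
      else
        -- string[i]; 0 ≤ i < len, so the default ' ' is dead
        let c := PySem.List.pyGetD l i ' '
        acc ++ [if 'a' ≤ c ∧ c ≤ 'z' then PySem.Chars.upperChar c
                else if 'A' ≤ c ∧ c ≤ 'Z' then PySem.Chars.lowerChar c
                else '.']) []
  String.ofList out

-- ===== PRECONDITION & SPEC =====
def Spec_even_old_ops (string : String) (out : String) : Prop := out = even_old_ops_alt string
instance (string : String) (out : String) : Decidable (Spec_even_old_ops string out) := by unfold Spec_even_old_ops; infer_instance

-- ===== CLAIM (what is proved, stated in full; the proofs are below) =====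
def Claim_equal_even_old_ops : Prop := ∀ (string : String), Dom_even_old_ops string → Spec_even_old_ops string (even_old_ops string)

-- ===== LEMMAS AND PROOFS =====

-- the even- and odd-index sublists of a list
mutual
def pvEvn : List Char → List Char
  | [] => []
  | x :: xs => x :: pvOdd xs
def pvOdd : List Char → List Char
  | [] => []
  | _ :: xs => pvEvn xs
end

theorem pvLen_evn_odd (l : List Char) :
    (pvOdd l).length ≤ (pvEvn l).length ∧ (pvEvn l).length ≤ (pvOdd l).length + 1 ∧
    (pvEvn l).length + (pvOdd l).length = l.length := by
  induction l with
  | nil => simp [pvEvn, pvOdd]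
  | cons x xs ih => simp [pvEvn, pvOdd] at *; omega

theorem pvInterleave_evn_odd (l : List Char) : pvInterleave (pvEvn l) (pvOdd l) = l := by
  induction l with
  | nil => simp [pvEvn, pvOdd, pvInterleave]
  | cons x xs ih => simpa [pvEvn, pvOdd, pvInterleave] using ih

theorem pvInterleave_getElem? (a b : List Char) (h1 : b.length ≤ a.length)
    (h2 : a.length ≤ b.length + 1) :
    ∀ i : Nat, (pvInterleave a b)[i]? = if i % 2 = 0 then a[i / 2]? else b[i / 2]? := by
  induction a, b using pvInterleave.induct with
  | case1 ys =>
    have : ys = [] := by simpa using List.eq_nil_of_length_eq_zero (Nat.le_zero.mp (by simpa using h1))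
    subst this
    intro i; simp [pvInterleave]
  | case2 x xs ys ih =>
    intro i
    match i with
    | 0 => simp [pvInterleave]
    | (i+1) =>
      have hx : xs.length ≤ ys.length := by simp at h2; omega
      have hy : ys.length ≤ xs.length + 1 := by simp at h1; omega
      rw [pvInterleave]
      rw [List.getElem?_cons_succ, ih hx hy i]
      rcases Nat.even_or_odd i with he | ho
      · obtain ⟨k, hk⟩ := he
        have h1' : i % 2 = 0 := by omega
        have h2' : (i+1) % 2 ≠ 0 := by omega
        have h3' : (i+1)/2 = i/2 := by omega
        simp [h1', h2', h3']
      · obtain ⟨k, hk⟩ := ho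
        have h1' : i % 2 ≠ 0 := by omega
        have h2' : (i+1) % 2 = 0 := by omega
        have h3' : (i+1)/2 = i/2 + 1 := by omega
        simp [h1', h2', h3']

theorem pvLoopA_enum (l : List Char) : ∀ (s : Int) (ev od : List Char),
    (PySem.List.enumerate l s).foldl pvLoopA (ev, od) =
      if PySem.Int.mod s 2 = 0 then (ev ++ pvEvn l, od ++ pvOdd l)
      else (ev ++ pvOdd l, od ++ pvEvn l) := by
  induction l with
  | nil => intro s ev od; simp [PySem.List.enumerate_nil, pvEvn, pvOdd]
  | cons x xs ih =>
    intro s ev od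
    rw [PySem.List.enumerate_cons, List.foldl_cons]
    rw [PySem.Int.mod_eq_emod_of_pos (by norm_num)] at *
    by_cases hm : s % 2 = 0
    · have hm1 : (s + 1) % 2 ≠ 0 := by omega
      simp only [pvLoopA, hm, if_pos]
      rw [ih (s+1)]
      rw [PySem.Int.mod_eq_emod_of_pos (by norm_num)]
      simp [hm, hm1, pvEvn, pvOdd]
    · have hm1 : (s + 1) % 2 = 0 := by omega
      simp only [pvLoopA, hm, if_neg, not_false_iff]
      rw [ih (s+1)]
      rw [PySem.Int.mod_eq_emod_of_pos (by norm_num)]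
      simp [hm, hm1, pvEvn, pvOdd]

theorem pvLen3 (l : List Char) :
    (pvOdd l).length ≤ (pvEvn l).length ∧ (pvEvn l).length ≤ (pvOdd l).length + 1 :=
  ⟨(pvLen_evn_odd l).1, (pvLen_evn_odd l).2.1⟩

theorem pvEvn_getElem? (l : List Char) (j : Nat) : (pvEvn l)[j]? = l[2 * j]? := by
  conv_rhs => rw [← pvInterleave_evn_odd l]
  rw [pvInterleave_getElem? _ _ (pvLen3 l).1 (pvLen3 l).2 (2 * j)]
  have h1 : (2 * j) % 2 = 0 := by omega
  have h2 : (2 * j) / 2 = j := by omega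
  simp [h2]

theorem pvOdd_getElem? (l : List Char) (j : Nat) : (pvOdd l)[j]? = l[2 * j + 1]? := by
  conv_rhs => rw [← pvInterleave_evn_odd l]
  rw [pvInterleave_getElem? _ _ (pvLen3 l).1 (pvLen3 l).2 (2 * j + 1)]
  have h2 : (2 * j + 1) / 2 = j := by omega
  simp [h2]

theorem pvSlice2_eq (l : List Char) : (PySem.List.slice? l none none 2).getD [] = pvEvn l := by
  rw [PySem.List.slice?]
  simp only [PySem.List.sliceIndices]
  norm_num
  have hcount : (if 0 < l.length then (((l.length : Int) + 2 - 1) / 2).toNat else 0)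
      = (l.length + 1) / 2 := by
    split <;> omega
  rw [hcount]
  have hcong : ∀ x ∈ List.range ((l.length + 1) / 2),
      l[(2 * (x : Int)).toNat]? = (some ∘ fun x => l.getD (2 * x) ' ') x := by
    intro x hx
    rw [List.mem_range] at hx
    have h2x : 2 * x < l.length := by omega
    have h2x' : ((2 * (x : Int))).toNat = 2 * x := by omega
    rw [h2x']
    simp [List.getElem?_eq_getElem h2x]
  rw [List.filterMap_congr hcong, List.filterMap_eq_map]
  apply List.ext_getElem?
  intro i
  rw [List.getElem?_map, pvEvn_getElem?]
  by_cases hi : i < (l.length + 1) / 2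
  · have h2i : 2 * i < l.length := by omega
    simp [hi, List.getElem?_eq_getElem h2i]
  · simp [hi]
    omega

theorem even_old_ops_eq (s : String) :
    even_old_ops s =
      String.ofList (pvInterleave (pvEvn s.toList).reverse ((pvOdd s.toList).map pvSwapDotA)) := by
  unfold even_old_ops
  rw [pvLoopA_enum]
  simp

-- the element B's pass appends at position k
def pvG (l : List Char) (k : Nat) : Char :=
  if PySem.Int.mod (k : Int) 2 = 0 then
    (PySem.List.pyGet? (pvEvn l) (-(PySem.Int.floordiv (k : Int) 2 + 1))).getD ' '
  else
    let c := PySem.List.pyGetD l (k : Int) ' '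
    if 'a' ≤ c ∧ c ≤ 'z' then PySem.Chars.upperChar c
    else if 'A' ≤ c ∧ c ≤ 'Z' then PySem.Chars.lowerChar c
    else '.'

theorem pvG_map_eq (l : List Char) :
    (List.range l.length).map (pvG l) =
      pvInterleave (pvEvn l).reverse ((pvOdd l).map pvSwapDotA) := by
  have hL := pvLen_evn_odd l
  apply List.ext_getElem?
  intro i
  rw [pvInterleave_getElem? _ _ (by simp; omega) (by simp; omega) i]
  rw [List.getElem?_map]
  by_cases hi : i < l.length
  · rw [List.getElem?_range hi, Option.map_some]
    rcases Nat.even_or_odd i with ⟨j, hj⟩ | ⟨j, hj⟩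
    · -- i = j + j, even position: the reversed-even element
      have hmod : PySem.Int.mod (i : Int) 2 = 0 := by
        rw [PySem.Int.mod_eq_emod_of_pos (by norm_num)]; omega
      have hdiv : PySem.Int.floordiv (i : Int) 2 = (j : Int) := by
        rw [PySem.Int.floordiv_eq_ediv_of_pos (by norm_num)]; omega
      have hjE : j < (pvEvn l).length := by omega
      have hlt : (pvEvn l).length - 1 - j < (pvEvn l).length := by omega
      have hif : pvG l i = (pvEvn l)[(pvEvn l).length - 1 - j] := by
        simp only [pvG, hmod, if_pos, hdiv]
        rw [show -((j : Int) + 1) = -(((j + 1 : Nat)) : Int) by push_cast; ring]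
        rw [PySem.List.pyGet?_neg_natCast (pvEvn l) (j + 1) (by omega) (by omega)]
        rw [show (pvEvn l).length - (j + 1) = (pvEvn l).length - 1 - j by omega]
        rw [List.getElem?_eq_getElem hlt]
        rfl
      rw [if_pos (by omega : i % 2 = 0), show i / 2 = j by omega]
      rw [List.getElem?_reverse hjE, List.getElem?_eq_getElem hlt, hif]
    · -- i = 2 * j + 1, odd position: the transformed original character
      have hmod : ¬ PySem.Int.mod (i : Int) 2 = 0 := by
        rw [PySem.Int.mod_eq_emod_of_pos (by norm_num)]; omega
      have hjO : j < (pvOdd l).length := by omega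
      have hif : pvG l i = pvSwapDotA (l[i]'hi) := by
        simp only [pvG, hmod, if_neg, not_false_iff]
        rw [PySem.List.pyGetD_natCast, List.getD_eq_getElem _ _ hi]
        rfl
      rw [if_neg (by omega : ¬ i % 2 = 0), show i / 2 = j by omega, List.getElem?_map]
      rw [pvOdd_getElem?, ← hj, List.getElem?_eq_getElem hi, Option.map_some, hif]
  · have h1 : (List.range l.length)[i]? = none := by simp; omega
    rw [h1, Option.map_none]
    split
    · exact (List.getElem?_eq_none_iff.mpr (by simp; omega)).symm
    · exact (List.getElem?_eq_none_iff.mpr (by simp; omega)).symm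

theorem even_old_ops_alt_eq (s : String) :
    even_old_ops_alt s =
      String.ofList (pvInterleave (pvEvn s.toList).reverse ((pvOdd s.toList).map pvSwapDotA)) := by
  unfold even_old_ops_alt
  simp only [pvSlice2_eq, PySem.Str.len_eq, PySem.List.pyRange_zero_natCast, List.foldl_map]
  have hb : (fun (acc : List Char) (k : Nat) =>
      if PySem.Int.mod (k : Int) 2 = 0 then
        acc ++ [(PySem.List.pyGet? (pvEvn s.toList)
          (-(PySem.Int.floordiv (k : Int) 2 + 1))).getD ' ']
      else
        let c := PySem.List.pyGetD s.toList (k : Int) ' '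
        acc ++ [if 'a' ≤ c ∧ c ≤ 'z' then PySem.Chars.upperChar c
                else if 'A' ≤ c ∧ c ≤ 'Z' then PySem.Chars.lowerChar c
                else '.']) = fun acc k => acc ++ [pvG s.toList k] := by
    funext acc k
    simp only [pvG]
    split <;> rfl
  rw [hb, PySem.List.foldl_append_singleton_eq_map, List.nil_append, pvG_map_eq]

-- ===== VERDICT (by name: the statement is the Claim_ definition above) =====
theorem even_old_ops_spec : Claim_equal_even_old_ops := by
  intro s _
  unfold Spec_even_old_ops
  rw [even_old_ops_eq, even_old_ops_alt_eq]
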